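-- pv_equiv track=rewrite | github.com/MarckWeb/curso_avanzado_python | adicional/archivos/ejercicio.py | ocurrencias
-- ===== SOURCE A (Python) =====
-- def ocurrencias(string):
--     result = 0
--     for i in range(len(string)):
--         if string[i] == '1':
--             result += 1
--         else:
--             result -= 1
--     return result
-- ===== SOURCE B (Python) =====
-- def ocurrencias(string):
--     if len(string) == 0:
--         return 0
--     if len(string) == 1:
--         return 1 if string == '1' else -1
--     m = len(string) // 2
--     return ocurrencias(string[:m]) + ocurrencias(string[m:])
-- ===== Notes on version B (the rewrite author's own statement) =====
-- stated objective: alternative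
-- what changed: Replaces the index loop with an accumulator by a divide-and-conquer recursion: split the string in half, solve each half recursively, add the two results; correctness rests on the score being additive over concatenation.
import Mathlib
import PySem

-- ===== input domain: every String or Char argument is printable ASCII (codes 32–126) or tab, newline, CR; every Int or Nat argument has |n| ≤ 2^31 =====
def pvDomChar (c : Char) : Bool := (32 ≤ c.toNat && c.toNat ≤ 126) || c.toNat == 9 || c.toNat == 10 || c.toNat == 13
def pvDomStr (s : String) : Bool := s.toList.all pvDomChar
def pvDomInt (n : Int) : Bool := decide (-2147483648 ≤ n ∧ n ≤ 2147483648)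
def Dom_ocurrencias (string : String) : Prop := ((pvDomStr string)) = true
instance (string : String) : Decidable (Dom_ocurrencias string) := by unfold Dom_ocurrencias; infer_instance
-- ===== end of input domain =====

-- B replaces the index loop and accumulator by divide-and-conquer recursion on string halves.

-- ===== PORT A =====
-- for i in range(len(string)): if string[i] == '1': result += 1 else: result -= 1
-- string[i] is read with pyGetD (default never used: every i produced by range(len) is in range, where pyGetD is exact).
def ocurrencias (string : String) : Int :=
  (PySem.List.pyRange 0 (PySem.Str.len string)).foldl
    (fun result i =>
      if PySem.List.pyGetD string.toList i ' ' = '1' then result + 1 else result - 1) 0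

-- ===== PORT B =====
-- Recursive helper on the character list; string[:m] / string[m:] with 0 ≤ m ≤ len(string)
-- are exactly List.take m / List.drop m (exact on that range, no clamping or wraparound involved).
def ocurGo (l : List Char) : Int :=
  if l.length = 0 then 0
  else if l.length = 1 then (if l = ['1'] then 1 else -1)
  else
    ocurGo (l.take (l.length / 2)) + ocurGo (l.drop (l.length / 2))
termination_by l.length
decreasing_by
  · simp only [List.length_take]; omega
  · simp only [List.length_drop]; omega

def ocurrencias_alt (string : String) : Int := ocurGo string.toList

-- ===== PRECONDITION & SPEC =====
def Spec_ocurrencias (string : String) (out : Int) : Prop := out = ocurrencias_alt string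
instance (string : String) (out : Int) : Decidable (Spec_ocurrencias string out) := by unfold Spec_ocurrencias; infer_instance

-- ===== CLAIM (what is proved, stated in full; the proofs are below) =====
def Claim_equal_ocurrencias : Prop := ∀ (string : String), Dom_ocurrencias string → Spec_ocurrencias string (ocurrencias string)

-- ===== LEMMAS AND PROOFS =====

-- The accumulator loop of A in closed form.
theorem loop_closed (cs : List Char) :
    ∀ (init : Int),
      cs.foldl (fun r ch => if ch = '1' then r + 1 else r - 1) init
        = init + 2 * (cs.count '1' : Int) - cs.length := by
  induction cs with
  | nil => intro init; simp
  | cons hd t ih =>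
    intro init
    simp only [List.foldl_cons, ih, List.count_cons, List.length_cons]
    by_cases h : hd = '1' <;> simp [h] <;> ring

-- The divide-and-conquer recursion computes the same closed form (score is additive over concatenation).
theorem ocurGo_eq : ∀ (n : Nat) (l : List Char), l.length ≤ n →
    ocurGo l = 2 * (l.count '1' : Int) - l.length := by
  intro n
  induction n with
  | zero =>
    intro l h
    have : l = [] := List.eq_nil_of_length_eq_zero (Nat.le_zero.mp h)
    subst this; simp [ocurGo]
  | succ n ih =>
    intro l h
    rw [ocurGo]
    by_cases h0 : l.length = 0
    · have : l = [] := List.eq_nil_of_length_eq_zero h0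
      subst this; simp
    · simp only [h0, if_false]
      by_cases h1 : l.length = 1
      · simp only [h1, if_true]
        obtain ⟨c, rfl⟩ : ∃ c, l = [c] := by
          cases l with
          | nil => simp at h1
          | cons a t =>
            cases t with
            | nil => exact ⟨a, rfl⟩
            | cons b u => simp at h1
        by_cases hc : c = '1' <;> simp [hc]
      · simp only [h1, if_false]
        have hlen : 2 ≤ l.length := by omega
        have ht : (l.take (l.length / 2)).length ≤ n := by
          simp only [List.length_take]; omega
        have hd : (l.drop (l.length / 2)).length ≤ n := by
          simp only [List.length_drop]; omega
        rw [ih _ ht, ih _ hd]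
        have hcount : (l.take (l.length / 2)).count '1' + (l.drop (l.length / 2)).count '1'
            = l.count '1' := by
          conv_rhs => rw [← List.take_append_drop (l.length / 2) l]
          rw [List.count_append]
        have hlength : (l.take (l.length / 2)).length + (l.drop (l.length / 2)).length
            = l.length := by
          simp only [List.length_take, List.length_drop]; omega
        omega

-- ===== VERDICT (by name: the statement is the Claim_ definition above) =====
theorem ocurrencias_spec : Claim_equal_ocurrencias := by
  intro s _
  show ocurrencias s = ocurrencias_alt s
  unfold ocurrencias ocurrencias_alt
  rw [PySem.Str.len_eq, PySem.List.foldl_pyRange_pyGetD' s.toList ' '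
        (fun r ch => if ch = '1' then r + 1 else r - 1) 0 (le_refl 0)]
  rw [Int.toNat_zero, List.drop_zero, loop_closed,
      ocurGo_eq s.toList.length s.toList le_rfl]
  ring
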